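-- pv_equiv track=rewrite | github.com/jamesb5959/CS2402 | Beltran_Bradley_ex_part1.py | items_before
-- ===== SOURCE A (Python) =====
-- def items_before(L,x):
--     Z=[]
--     for i in range(len(L)):
--         if L[i] == x:
--             break
--         else:
--             Z.append(L[i])
--     return Z
-- ===== SOURCE B (Python) =====
-- def items_before(L, x):
--     if x in L:
--         return L[:L.index(x)]
--     return list(L)
-- ===== Notes on version B (the rewrite author's own statement) =====
-- stated objective: simpler
-- what changed: Replaces the append-while-scanning loop with an index lookup followed by a prefix slice (whole-list copy when x is absent).
import Mathlib
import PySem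

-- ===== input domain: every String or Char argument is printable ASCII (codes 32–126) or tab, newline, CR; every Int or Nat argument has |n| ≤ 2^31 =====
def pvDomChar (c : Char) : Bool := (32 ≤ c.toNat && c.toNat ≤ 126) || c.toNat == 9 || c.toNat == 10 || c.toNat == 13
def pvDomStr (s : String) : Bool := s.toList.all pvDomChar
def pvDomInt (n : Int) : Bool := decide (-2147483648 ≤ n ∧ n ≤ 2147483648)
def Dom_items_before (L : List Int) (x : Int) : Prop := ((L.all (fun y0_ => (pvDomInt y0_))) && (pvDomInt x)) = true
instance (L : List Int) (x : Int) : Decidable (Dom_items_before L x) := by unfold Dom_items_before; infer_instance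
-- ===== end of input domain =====

-- B replaces A's append-while-scanning loop by an index lookup followed by a prefix slice (simpler decomposition).


-- ===== PORT A =====
-- loop 'for i in range(len(L)): if L[i]==x: break else Z.append(L[i])' as structural recursion carrying Z
def items_before_loop (x : Int) : List Int → List Int → List Int
  | [], Z => Z
  | y :: ys, Z => if y = x then Z else items_before_loop x ys (Z ++ [y])

def items_before (L : List Int) (x : Int) : List Int :=
  items_before_loop x L []

-- ===== PORT B =====
def items_before_alt (L : List Int) (x : Int) : List Int :=
  match PySem.List.index? L x with
  | some k => PySem.List.slice L none (some (k : Int))   -- L[:L.index(x)]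
  | none => L                                            -- x not in L: list(L)

-- ===== PRECONDITION & SPEC =====
def Spec_items_before (L : List Int) (x : Int) (out : List Int) : Prop := out = items_before_alt L x
instance (L : List Int) (x : Int) (out : List Int) : Decidable (Spec_items_before L x out) := by unfold Spec_items_before; infer_instance

-- ===== CLAIM =====
def Claim_equal_items_before : Prop := ∀ (L : List Int) (x : Int), Dom_items_before L x → Spec_items_before L x (items_before L x)

-- ===== LEMMAS AND PROOFS =====
theorem takeWhile_ne_of_not_mem (L : List Int) (x : Int) (h : x ∉ L) :
    L.takeWhile (fun y => y ≠ x) = L := by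
  induction L with
  | nil => rfl
  | cons y ys ih =>
    simp only [List.mem_cons, not_or] at h
    have hy : ¬ y = x := fun e => h.1 e.symm
    simp [hy]
    exact fun z hz e => h.2 (e ▸ hz)

theorem items_before_loop_acc (x : Int) (L Z : List Int) :
    items_before_loop x L Z = Z ++ items_before_loop x L [] := by
  induction L generalizing Z with
  | nil => simp [items_before_loop]
  | cons y ys ih =>
    by_cases h : y = x
    · simp [items_before_loop, h]
    · rw [items_before_loop, items_before_loop, if_neg h, if_neg h]
      simp only [ih (Z ++ [y]), List.nil_append, ih [y], List.append_assoc]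

theorem items_before_eq_takeWhile (x : Int) (L : List Int) :
    items_before L x = L.takeWhile (fun y => y ≠ x) := by
  unfold items_before
  induction L with
  | nil => rfl
  | cons y ys ih =>
    by_cases h : y = x
    · simp [items_before_loop, h, List.takeWhile]
    · rw [items_before_loop, if_neg h, items_before_loop_acc, ih]
      simp [List.takeWhile, h]

theorem alt_eq_takeWhile (x : Int) (L : List Int) :
    items_before_alt L x = L.takeWhile (fun y => y ≠ x) := by
  unfold items_before_alt
  cases hk : PySem.List.index? L x with
  | none =>
    rw [PySem.List.index?_eq_none_iff] at hk
    exact (takeWhile_ne_of_not_mem L x hk).symm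
  | some k =>
    simp only
    rw [PySem.List.index?_eq_some_iff] at hk
    obtain ⟨pre, suf, rfl, hlen, hnot⟩ := hk
    rw [PySem.List.slice_to_natCast]
    subst hlen
    induction pre with
    | nil => simp
    | cons y ys ih =>
      simp only [List.mem_cons, not_or] at hnot
      simp only [List.cons_append, List.takeWhile, List.length_cons, List.take_succ_cons]
      rw [decide_eq_true (by exact fun h => hnot.1 h.symm : (fun y => y ≠ x) y)]
      simp only [ih hnot.2]

-- ===== VERDICT =====
theorem items_before_spec : Claim_equal_items_before := by
  intro L x _
  unfold Spec_items_before
  rw [items_before_eq_takeWhile, alt_eq_takeWhile]
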